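-- pv_equiv track=rewrite | github.com/joshanashakya/dissertation | workspace/dataset/java-python/GeeksForGeeks/637/A/2.py | fibonacciArray
-- ===== SOURCE A (Python) =====
-- def fibonacciArray(arr, n):
--
--     s = set()
--
--     # a and b are first two
--     # fibonacci numbers
--     a, b = 1, 1
--
--     # insert first n fibonacci elements to set
--     s.add(a)
--     if n >= 2:
--         s.add(b)
--
--     for i in range(0, n - 2):
--         c = a + b
--         s.add(c)
--         a, b = b, c
--
--     for i in range(0, n):
--
--         # if fibonacci element is present in
--         # the array then remove it from set
--         if arr[i] in s:
--             s.remove(arr[i])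
--
--     # return the remaining number
--     # of elements in the set
--     return len(s)
-- ===== SOURCE B (Python) =====
-- def fibonacciArray(arr, n):
--     # Sort the first n array elements once; membership tests are binary searches.
--     vals = sorted(arr[i] for i in range(n))
--
--     def present(x):
--         lo, hi = 0, len(vals)
--         while lo < hi:
--             mid = (lo + hi) // 2
--             if vals[mid] < x:
--                 lo = mid + 1
--             else:
--                 hi = mid
--         return lo < len(vals) and vals[lo] == x
--
--     # Generate the first-n Fibonacci values (the duplicate 1,1 collapses to one
--     # value) and count the missing ones on the fly -- no sets are built.
--     count = 0 if present(1) else 1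
--     a, b = 1, 1
--     for _ in range(n - 2):
--         a, b = b, a + b
--         if not present(b):
--             count += 1
--     return count
-- ===== Notes on version B (the rewrite author's own statement) =====
-- stated objective: alternative
-- what changed: A builds the Fibonacci set and destructively removes array elements from it, returning the remaining size; B uses no sets at all: it sorts the first n array elements once, tests membership by a hand-written binary search, and counts the missing Fibonacci values with a running counter while generating them.
import Mathlib
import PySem

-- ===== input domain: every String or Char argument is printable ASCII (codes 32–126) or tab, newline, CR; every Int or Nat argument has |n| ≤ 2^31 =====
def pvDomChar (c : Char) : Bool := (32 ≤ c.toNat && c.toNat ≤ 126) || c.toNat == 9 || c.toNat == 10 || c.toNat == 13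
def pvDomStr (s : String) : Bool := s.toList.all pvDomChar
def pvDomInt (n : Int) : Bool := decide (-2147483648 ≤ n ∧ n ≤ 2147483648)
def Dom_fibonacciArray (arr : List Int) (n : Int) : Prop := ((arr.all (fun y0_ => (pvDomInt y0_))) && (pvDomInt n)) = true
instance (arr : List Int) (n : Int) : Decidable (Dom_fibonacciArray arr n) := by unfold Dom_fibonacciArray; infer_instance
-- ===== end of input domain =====

-- B drops A's hash sets entirely: it sorts the first n array elements once, answers
-- membership by a hand-written binary search, and counts the missing Fibonacci values
-- with a running counter while generating them (objective: alternative).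

-- ===== PORT A =====
def fibonacciArray (arr : List Int) (n : Int) : Int :=
  let s : PySem.Set Int := PySem.Set.empty
  let a : Int := 1
  let b : Int := 1
  let s := PySem.Set.add s a
  let s := if 2 ≤ n then PySem.Set.add s b else s
  let sab := (PySem.List.pyRange 0 (n - 2) 1).foldl
      (fun (st : PySem.Set Int × Int × Int) _ =>
        let c := st.2.1 + st.2.2
        (PySem.Set.add st.1 c, st.2.2, c))
      (s, a, b)
  let s := (PySem.List.pyRange 0 n 1).foldl
      (fun (s : PySem.Set Int) i =>
        -- arr[i]: pyGetD is exact here, Pre_ guarantees the index is in range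
        let v := PySem.List.pyGetD arr i 0
        if PySem.Set.contains s v then (PySem.Set.remove? s v).getD s else s)
      sab.1
  PySem.Set.len s

-- ===== PORT B =====
-- the 'while lo < hi' binary-search loop of Source B's 'present'; lo, hi are the Python
-- ints of that loop (always nonnegative, so Nat and '(lo + hi) // 2' = Nat division
-- are exact); vals[mid] via pyGetD is exact since lo ≤ mid < hi ≤ len(vals)
def bsLoop (vals : List Int) (x : Int) (lo hi : Nat) : Nat :=
  if lo < hi then
    let mid := (lo + hi) / 2
    if PySem.List.pyGetD vals (mid : Int) 0 < x then bsLoop vals x (mid + 1) hi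
    else bsLoop vals x lo mid
  else lo
termination_by hi - lo
decreasing_by
  · omega
  · omega

-- Source B's 'present': 'lo < len(vals) and vals[lo] == x' (the pyGetD read is guarded
-- by the lo < len conjunct, where it is exact)
def bsPresent (vals : List Int) (x : Int) : Bool :=
  let lo := bsLoop vals x 0 vals.length
  decide (lo < vals.length) && (PySem.List.pyGetD vals (lo : Int) 0 == x)

def fibonacciArray_alt (arr : List Int) (n : Int) : Int :=
  -- vals = sorted(arr[i] for i in range(n)); pyGetD is exact here under Pre_
  let vals := PySem.List.sorted ((PySem.List.pyRange 0 n 1).map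
      (fun i => PySem.List.pyGetD arr i 0)) (fun x => x) false
  let count : Int := if bsPresent vals 1 then 0 else 1
  let st := (PySem.List.pyRange 0 (n - 2) 1).foldl
      (fun (st : Int × Int × Int) _ =>
        (if bsPresent vals (st.2.1 + st.2.2) then st.1 else st.1 + 1,
         st.2.2, st.2.1 + st.2.2))
      (count, 1, 1)
  st.1

-- ===== PRECONDITION & SPEC =====
-- Pre_ excludes exactly the inputs where Python raises IndexError (both A and B do): n > len(arr).
def Pre_fibonacciArray (arr : List Int) (n : Int) : Prop := n ≤ (arr.length : Int)
instance (arr : List Int) (n : Int) : Decidable (Pre_fibonacciArray arr n) := by unfold Pre_fibonacciArray; infer_instance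
def pvWitness_fibonacciArray : List Int × Int := ([1, 4, 2], 2)
def Spec_fibonacciArray (arr : List Int) (n : Int) (out : Int) : Prop := out = fibonacciArray_alt arr n
instance (arr : List Int) (n : Int) (out : Int) : Decidable (Spec_fibonacciArray arr n out) := by unfold Spec_fibonacciArray; infer_instance

-- ===== CLAIM (what is proved, stated in full; the proofs are below) =====
def Claim_equal_fibonacciArray : Prop := ∀ (arr : List Int) (n : Int), Dom_fibonacciArray arr n → Pre_fibonacciArray arr n → Spec_fibonacciArray arr n (fibonacciArray arr n)

-- ===== LEMMAS AND PROOFS =====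

-- The guarded `if arr[i] in s: s.remove(arr[i])` of A is exactly set.discard.
theorem guarded_remove_eq_discard (s : PySem.Set Int) (v : Int) :
    (if PySem.Set.contains s v then (PySem.Set.remove? s v).getD s else s) = PySem.Set.discard s v := by
  by_cases h : v ∈ s
  · rw [if_pos ((PySem.Set.contains_iff s v).mpr h), PySem.Set.remove?_of_mem h, Option.getD_some]
  · rw [if_neg (by simpa [PySem.Set.contains_iff] using h)]
    unfold PySem.Set.discard
    refine (List.filter_eq_self.mpr ?_).symm
    intro y hy
    simp only [Bool.not_eq_eq_eq_not, Bool.not_true, beq_eq_false_iff_ne]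
    exact fun e => h (e ▸ hy)

-- Folding discard over a list of values filters out exactly those values.
theorem foldl_discard_eq_filter (vs : List Int) (s : PySem.Set Int) :
    vs.foldl PySem.Set.discard s = s.filter (fun y => !(vs.contains y)) := by
  induction vs generalizing s with
  | nil => simp
  | cons v vs ih =>
    rw [List.foldl_cons, ih]
    unfold PySem.Set.discard
    rw [List.filter_filter]
    apply List.filter_congr
    intro y _
    simp [Bool.and_comm, beq_eq_decide]

-- An index loop over range(n) reading arr[i] is a fold over the first n elements.
theorem foldl_range_getD {β : Type} (arr : List Int) (m : Nat) (h : m ≤ arr.length)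
    (g : β → Int → β) (init : β) :
    (PySem.List.pyRange 0 (m : Int) 1).foldl (fun acc i => g acc (PySem.List.pyGetD arr i 0)) init
      = (arr.take m).foldl g init := by
  induction m generalizing init with
  | zero => simp
  | succ k ih =>
    have hk : k < arr.length := by omega
    rw [show ((k + 1 : Nat) : Int) = (k : Int) + 1 by push_cast; ring,
        PySem.List.pyRange_one_succ_right (by positivity),
        List.foldl_append, ih (by omega),
        List.take_add_one, List.foldl_append]
    simp [PySem.List.pyGetD_natCast, hk]

theorem foldl_range_getD_int {β : Type} (arr : List Int) (n : Int) (h : n ≤ (arr.length : Int))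
    (g : β → Int → β) (init : β) :
    (PySem.List.pyRange 0 n 1).foldl (fun acc i => g acc (PySem.List.pyGetD arr i 0)) init
      = (arr.take n.toNat).foldl g init := by
  by_cases hn : n ≤ 0
  · rw [PySem.List.pyRange_one_eq_nil hn, show n.toNat = 0 by omega]
    simp
  · rw [show n = (n.toNat : Int) by omega] at *
    exact foldl_range_getD arr n.toNat (by exact_mod_cast h) g init

-- The generator (arr[i] for i in range(n)) produces the first n elements.
theorem map_range_getD (arr : List Int) (m : Nat) (h : m ≤ arr.length) :
    (PySem.List.pyRange 0 (m : Int) 1).map (fun i => PySem.List.pyGetD arr i 0)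
      = arr.take m := by
  induction m with
  | zero => simp
  | succ k ih =>
    have hk : k < arr.length := by omega
    rw [show ((k + 1 : Nat) : Int) = (k : Int) + 1 by push_cast; ring,
        PySem.List.pyRange_one_succ_right (by positivity),
        List.map_append, ih (by omega), List.take_add_one]
    simp [PySem.List.pyGetD_natCast, hk]

theorem map_range_getD_int (arr : List Int) (n : Int) (h : n ≤ (arr.length : Int)) :
    (PySem.List.pyRange 0 n 1).map (fun i => PySem.List.pyGetD arr i 0)
      = arr.take n.toNat := by
  by_cases hn : n ≤ 0
  · rw [PySem.List.pyRange_one_eq_nil hn, show n.toNat = 0 by omega]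
    simp
  · rw [show n = (n.toNat : Int) by omega] at *
    exact map_range_getD arr n.toNat (by exact_mod_cast h)

-- Binary-search loop invariant on a list monotone in getD: everything left of the
-- returned index is < x, everything from it on is ≥ x.
theorem bsLoop_spec (vals : List Int) (x : Int)
    (hmono : ∀ p q : Nat, p ≤ q → q < vals.length → vals.getD p 0 ≤ vals.getD q 0) :
    ∀ (lo hi : Nat), hi ≤ vals.length →
    (∀ i, i < lo → vals.getD i 0 < x) →
    (∀ i, hi ≤ i → i < vals.length → x ≤ vals.getD i 0) →
    (∀ i, i < bsLoop vals x lo hi → vals.getD i 0 < x) ∧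
    (∀ i, bsLoop vals x lo hi ≤ i → i < vals.length → x ≤ vals.getD i 0) := by
  intro lo hi
  induction hlh : hi - lo using Nat.strong_induction_on generalizing lo hi with
  | _ d ih =>
    intro hhi hlo hge
    by_cases h : lo < hi
    · have hmidlt : (lo + hi) / 2 < vals.length := by omega
      rw [bsLoop, if_pos h]
      simp only [PySem.List.pyGetD_natCast]
      by_cases hc : vals.getD ((lo + hi) / 2) 0 < x
      · rw [if_pos hc]
        subst hlh
        refine ih (hi - ((lo + hi) / 2 + 1)) (by omega) _ _ rfl hhi ?_ hge
        intro i hi'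
        exact lt_of_le_of_lt (hmono i ((lo + hi) / 2) (by omega) hmidlt) hc
      · rw [if_neg hc]
        subst hlh
        refine ih ((lo + hi) / 2 - lo) (by omega) _ _ rfl (by omega) hlo ?_
        intro i hmi hil
        exact le_trans (not_lt.mp hc) (hmono _ i hmi hil)
    · rw [bsLoop, if_neg h]
      exact ⟨hlo, fun i hli hil => hge i (by omega) hil⟩

-- Source B's binary-search membership test is list membership (on a sorted list).
theorem bsPresent_iff_mem (vals : List Int) (x : Int)
    (hmono : ∀ p q : Nat, p ≤ q → q < vals.length → vals.getD p 0 ≤ vals.getD q 0) :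
    bsPresent vals x = true ↔ x ∈ vals := by
  obtain ⟨h1, h2⟩ := bsLoop_spec vals x hmono 0 vals.length le_rfl
      (fun i hi => absurd hi (Nat.not_lt_zero i))
      (fun i hi hil => absurd hil (by omega))
  unfold bsPresent
  simp only [Bool.and_eq_true, decide_eq_true_eq, beq_iff_eq, PySem.List.pyGetD_natCast]
  constructor
  · rintro ⟨hlt, heq⟩
    rw [List.getD_eq_getElem _ _ hlt] at heq
    exact heq ▸ List.getElem_mem hlt
  · intro hx
    obtain ⟨i, hil, hix⟩ := List.mem_iff_getElem.mp hx
    have hri : bsLoop vals x 0 vals.length ≤ i := by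
      by_contra hc
      have := h1 i (by omega)
      rw [List.getD_eq_getElem _ _ hil, hix] at this
      omega
    have hrl : bsLoop vals x 0 vals.length < vals.length := by omega
    refine ⟨hrl, le_antisymm ?_ (h2 _ le_rfl hrl)⟩
    calc vals.getD (bsLoop vals x 0 vals.length) 0 ≤ vals.getD i 0 := hmono _ i hri hil
      _ = x := by rw [List.getD_eq_getElem _ _ hil, hix]

-- Joint invariant of A's set-building fold and B's counting fold: as long as every
-- element already in the set is ≤ b and 1 ≤ a ≤ b, each step adds a FRESH value
-- c = a + b to A's set while B adds the same 0/1 indicator to its counter.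
theorem joint_fold (q : Int → Bool) (L : List Int) :
    ∀ (s : PySem.Set Int) (a b cnt : Int),
    (∀ y ∈ s, y ≤ b) → 1 ≤ a → a ≤ b →
    (((L.foldl (fun (st : PySem.Set Int × Int × Int) _ =>
          (PySem.Set.add st.1 (st.2.1 + st.2.2), st.2.2, st.2.1 + st.2.2)) (s, a, b)).1.countP
        (fun y => !q y) : Int) + cnt
      = (L.foldl (fun (st : Int × Int × Int) _ =>
          (if q (st.2.1 + st.2.2) then st.1 else st.1 + 1,
           st.2.2, st.2.1 + st.2.2)) (cnt, a, b)).1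
        + ((s : List Int).countP (fun y => !q y) : Int)) := by
  induction L with
  | nil => intro s a b cnt _ _ _; simp only [List.foldl_nil]; omega
  | cons hd tl ih =>
    intro s a b cnt hle ha hab
    have hbc : b < a + b := by omega
    have hnotmem : (a + b) ∉ s := fun hm => absurd (hle _ hm) (by omega)
    have hadd : PySem.Set.add s (a + b) = s ++ [a + b] := by
      unfold PySem.Set.add
      rw [if_neg (by simpa [PySem.Set.contains_iff] using hnotmem)]
    simp only [List.foldl_cons]
    rw [hadd]
    have := ih (s ++ [a + b]) b (a + b) (if q (a + b) then cnt else cnt + 1)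
        (by intro y hy
            rcases List.mem_append.mp hy with h | h
            · exact le_of_lt (lt_of_le_of_lt (hle y h) hbc)
            · simp_all)
        (by omega) (by omega)
    rw [List.countP_append, List.countP_singleton] at this
    by_cases hqc : q (a + b) <;> simp only [hqc, if_true, Bool.not_true,
      Bool.not_false] at this ⊢ <;> push_cast at this ⊢ <;> omega

-- ===== VERDICT (by name: the statement is the Claim_ definition above) =====
theorem fibonacciArray_spec : Claim_equal_fibonacciArray := by
  intro arr n _ hpre
  unfold Spec_fibonacciArray fibonacciArray fibonacciArray_alt
  simp only []
  -- A's seeding: adding b = 1 again never changes the set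
  rw [show (if 2 ≤ n then PySem.Set.add (PySem.Set.add PySem.Set.empty (1:Int)) 1
        else PySem.Set.add PySem.Set.empty 1) = PySem.Set.add PySem.Set.empty (1:Int) by
      split_ifs <;> rfl]
  -- B's sorted list of the first n array elements
  rw [map_range_getD_int arr n hpre]
  set vals := PySem.List.sorted (arr.take n.toNat) (fun x => x) false with hvals
  have hmono : ∀ p q : Nat, p ≤ q → q < vals.length → vals.getD p 0 ≤ vals.getD q 0 := by
    intro p q hpq hq
    rw [List.getD_eq_getElem _ _ (by omega), List.getD_eq_getElem _ _ hq]
    exact PySem.List.sorted_id_getElem_mono (arr.take n.toNat) hpq hq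
  have hq : ∀ y : Int, bsPresent vals y = (arr.take n.toNat).contains y := by
    intro y
    rw [Bool.eq_iff_iff, bsPresent_iff_mem vals y hmono, List.contains_iff_mem, hvals,
        PySem.List.mem_sorted]
  -- A's removal loop → filter by membership in the first n elements
  set F := ((PySem.List.pyRange 0 (n - 2) 1).foldl
      (fun (st : PySem.Set Int × Int × Int) _ =>
        (PySem.Set.add st.1 (st.2.1 + st.2.2), st.2.2, st.2.1 + st.2.2))
      (PySem.Set.add PySem.Set.empty (1:Int), 1, 1)).1 with hF
  rw [foldl_range_getD_int arr n hpre
        (fun s v => if PySem.Set.contains s v then (PySem.Set.remove? s v).getD s else s) F]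
  have hdisc : (arr.take n.toNat).foldl
      (fun s v => if PySem.Set.contains s v then (PySem.Set.remove? s v).getD s else s) F
        = (arr.take n.toNat).foldl PySem.Set.discard F := by
    simp only [guarded_remove_eq_discard]
  rw [hdisc, foldl_discard_eq_filter]
  unfold PySem.Set.len
  rw [← List.countP_eq_length_filter,
      List.countP_congr (q := fun y => !bsPresent vals y) (fun y _ => by simp only [hq y])]
  -- counting via the joint fold invariant, seeded with s = {1}, cnt = [1 missing?]
  have hjoint := joint_fold (bsPresent vals) (PySem.List.pyRange 0 (n - 2) 1)
      (PySem.Set.add PySem.Set.empty (1:Int)) 1 1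
      (if bsPresent vals 1 then 0 else 1)
      (by intro y hy; simp [PySem.Set.add, PySem.Set.empty] at hy; omega)
      le_rfl le_rfl
  rw [← hF] at hjoint
  have hinit : ((PySem.Set.add PySem.Set.empty (1:Int) : List Int).countP
      (fun y => !bsPresent vals y) : Int) = (if bsPresent vals 1 then 0 else 1) := by
    by_cases h1 : bsPresent vals 1 <;>
      simp [PySem.Set.add, PySem.Set.empty, h1]
  rw [hinit] at hjoint
  omega
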